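-- pv_equiv track=rewrite | github.com/COL-IU/ClonalTREE | myutils.py | ancestry_graph
-- ===== SOURCE A (Python) =====
-- def ancestry_graph(F):
--     m = len(F)
--     n = len(F[0])
--     G = [[0 for _ in range(n)] for _ in range(n)]
--     for i in range(0, n):
--         edges = set(list(range(n)))
--         for j in range(0, m):
--             temp = set()
--             for k in range(0, n):
--                 if F[j][k] <= F[j][i]:
--                     temp.add(k)
--             edges = edges & temp
--         for e in edges:
--             G[e][i] = 1
--     return G
-- ===== SOURCE B (Python) =====
-- def ancestry_graph(F):
--     m = len(F)
--     n = len(F[0])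
--     return [[1 if all(F[j][k] <= F[j][i] for j in range(m)) else 0
--              for i in range(n)]
--             for k in range(n)]
-- ===== Notes on version B (the rewrite author's own statement) =====
-- stated objective: simpler
-- what changed: Replaces A's per-column construction (build a set per row, intersect sets across rows, then write 1s through the surviving edge set into a preallocated zero matrix) by a direct comprehension that fills each matrix entry G[k][i] with the pairwise dominance test all(F[j][k] <= F[j][i]); no sets, no intersections, no mutation.
import Mathlib
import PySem

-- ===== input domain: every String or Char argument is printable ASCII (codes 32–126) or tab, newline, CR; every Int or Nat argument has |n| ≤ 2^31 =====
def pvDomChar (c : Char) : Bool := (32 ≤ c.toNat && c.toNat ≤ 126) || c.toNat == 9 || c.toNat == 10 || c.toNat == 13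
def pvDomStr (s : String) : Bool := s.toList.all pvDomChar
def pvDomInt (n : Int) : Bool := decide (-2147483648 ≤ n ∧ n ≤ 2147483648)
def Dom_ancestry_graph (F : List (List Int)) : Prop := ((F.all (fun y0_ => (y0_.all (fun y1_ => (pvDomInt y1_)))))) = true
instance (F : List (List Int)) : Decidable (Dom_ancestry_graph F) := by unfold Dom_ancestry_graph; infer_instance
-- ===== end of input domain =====

-- B replaces A's per-column row-set building, set intersections and in-place writes by a
-- direct entrywise dominance comprehension (simpler; same asymptotic cost).

-- ===== PORT A =====
def ancestry_graph (F : List (List Int)) : List (List Int) :=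
  let m : Int := PySem.List.len F
  let n : Int := PySem.List.len (F.headD [])
  let G : List (List Int) :=
    (PySem.List.pyRange 0 n 1).map (fun _ => (PySem.List.pyRange 0 n 1).map (fun _ => (0 : Int)))
  (PySem.List.pyRange 0 n 1).foldl (fun G i =>
    let edges : PySem.Set Int :=
      (PySem.List.pyRange 0 m 1).foldl (fun edges j =>
        let temp : PySem.Set Int :=
          (PySem.List.pyRange 0 n 1).foldl (fun temp k =>
            if PySem.List.pyGetD (PySem.List.pyGetD F j []) k 0 ≤
                PySem.List.pyGetD (PySem.List.pyGetD F j []) i 0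
            then PySem.Set.add temp k else temp) PySem.Set.empty
        PySem.Set.inter edges temp)
        (PySem.Set.ofList (PySem.List.pyRange 0 n 1))
    -- 'for e in edges' only writes 1s into pairwise-distinct cells of G, so the result
    -- does not depend on the set's iteration order; we consume the Set left to right
    edges.foldl (fun G e =>
      PySem.List.pySetD G e (PySem.List.pySetD (PySem.List.pyGetD G e []) i 1)) G) G

-- ===== PORT B =====
def ancestry_graph_alt (F : List (List Int)) : List (List Int) :=
  let m : Int := PySem.List.len F
  let n : Int := PySem.List.len (F.headD [])
  (PySem.List.pyRange 0 n 1).map (fun k =>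
    (PySem.List.pyRange 0 n 1).map (fun i =>
      if (PySem.List.pyRange 0 m 1).all (fun j =>
          PySem.List.pyGetD (PySem.List.pyGetD F j []) k 0 ≤
            PySem.List.pyGetD (PySem.List.pyGetD F j []) i 0)
      then (1 : Int) else 0))

-- ===== PRECONDITION & SPEC =====
-- Pre_ excludes exactly the inputs on which the Python A raises IndexError:
-- empty F (F[0]) and rows shorter than the first row (F[j][k] for k < len(F[0])).
def Pre_ancestry_graph (F : List (List Int)) : Prop :=
  F ≠ [] ∧ ∀ r ∈ F, (F.headD []).length ≤ r.length
instance (F : List (List Int)) : Decidable (Pre_ancestry_graph F) := by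
  unfold Pre_ancestry_graph; infer_instance
def pvWitness_ancestry_graph : List (List Int) := [[1, 2], [2, 1]]

def Spec_ancestry_graph (F : List (List Int)) (out : List (List Int)) : Prop := out = ancestry_graph_alt F
instance (F : List (List Int)) (out : List (List Int)) : Decidable (Spec_ancestry_graph F out) := by unfold Spec_ancestry_graph; infer_instance

-- ===== CLAIM (what is proved, stated in full; the proofs are below) =====
def Claim_equal_ancestry_graph : Prop := ∀ (F : List (List Int)), Dom_ancestry_graph F → Pre_ancestry_graph F → Spec_ancestry_graph F (ancestry_graph F)

-- ===== LEMMAS AND PROOFS =====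

-- set.add of a fresh element appends it
theorem pv_add_not_mem {t : List Int} {x : Int} (hx : x ∉ t) : PySem.Set.add t x = t ++ [x] := by
  simp [PySem.Set.add, hx]

theorem pv_temp_aux (q : Int → Prop) [DecidablePred q] :
    ∀ (l t : List Int), (∀ x ∈ l, x ∉ t) → l.Nodup →
      l.foldl (fun t k => if q k then PySem.Set.add t k else t) t
        = t ++ l.filter (fun k => decide (q k)) := by
  intro l
  induction l with
  | nil => intro t _ _; simp
  | cons x l ih =>
    intro t hd hn
    simp only [List.foldl_cons]
    by_cases hq : q x
    · rw [if_pos hq, pv_add_not_mem (hd x (by simp))]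
      rw [ih (t ++ [x]) ?_ hn.of_cons]
      · simp [hq]
      · intro y hy
        simp only [List.mem_append, List.mem_singleton]
        rintro (h1 | rfl)
        · exact hd y (by simp [hy]) h1
        · exact (List.nodup_cons.mp hn).1 hy
    · rw [if_neg hq, ih t (fun y hy => hd y (by simp [hy])) hn.of_cons]
      simp [hq]

-- A's temp loop builds the filter of its (duplicate-free) index list
theorem pv_temp_eq_filter (q : Int → Prop) [DecidablePred q] (l : List Int) (h : l.Nodup) :
    l.foldl (fun t k => if q k then PySem.Set.add t k else t) PySem.Set.empty
      = l.filter (fun k => decide (q k)) := by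
  have := pv_temp_aux q l PySem.Set.empty (by intro x _; simp [PySem.Set.empty]) h
  simpa [PySem.Set.empty] using this

-- set(xs) of a duplicate-free list is the list itself
theorem pv_ofList_nodup {xs : List Int} (h : xs.Nodup) : PySem.Set.ofList xs = xs := by
  have hf : (fun (t : List Int) (k : Int) => if (fun (_ : Int) => True) k then PySem.Set.add t k else t)
      = PySem.Set.add := by
    funext t k; simp
  have := pv_temp_eq_filter (fun _ => True) xs h
  rw [hf] at this
  simpa [PySem.Set.ofList, PySem.Set.empty] using this

-- A's edges loop: folding set-intersections is a single filter
theorem pv_inter_fold (T : Int → List Int) :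
    ∀ (js : List Int) (E : List Int),
      js.foldl (fun E j => PySem.Set.inter E (T j)) E
        = E.filter (fun e => js.all (fun j => (T j).contains e)) := by
  intro js
  induction js with
  | nil => intro E; simp
  | cons j js ih =>
    intro E
    simp only [List.foldl_cons]
    rw [ih]
    simp [PySem.Set.inter, List.filter_filter, PySem.Set.contains, Bool.and_comm]

-- one column-update pass of A, Nat-indexed
theorem pv_col_fold (i : Nat) :
    ∀ (E : List Nat) (G : List (List Int)), E.Nodup → (∀ e ∈ E, e < G.length) →
      ((E.foldl (fun G e => G.set e ((G.getD e []).set i 1)) G).length = G.length ∧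
       ∀ a : Nat, (E.foldl (fun G e => G.set e ((G.getD e []).set i 1)) G)[a]?
          = if a ∈ E then (G[a]?.map (fun r => r.set i 1)) else G[a]?) := by
  intro E
  induction E with
  | nil => intro G _ _; simp
  | cons e E ih =>
    intro G hn hb
    have he : e < G.length := hb e (by simp)
    have hget : G.getD e [] = G[e] := by
      rw [List.getD_eq_getElem?_getD, List.getElem?_eq_getElem he]; rfl
    set G1 := G.set e ((G.getD e []).set i 1) with hG1
    have hlen1 : G1.length = G.length := by simp [hG1]
    obtain ⟨hl, hent⟩ := ih G1 hn.of_cons (by intro x hx; rw [hlen1]; exact hb x (by simp [hx]))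
    constructor
    · simpa [hlen1] using hl
    · intro a
      simp only [List.foldl_cons]
      rw [hent a]
      by_cases hae : a = e
      · subst hae
        have hne : a ∉ E := (List.nodup_cons.mp hn).1
        simp [hne, hG1, he]
      · have : G1[a]? = G[a]? := by simp [hG1, Ne.symm hae]
        simp [this, hae]

-- per-row view of A's sequence of column passes
theorem pv_outer_fold (P : Nat → Nat → Bool) (n : Nat) :
    ∀ (C : List Nat) (G : List (List Int)), G.length = n →
      (((C.foldl (fun G i =>
          (((List.range n).filter (fun k => P i k)).foldl
            (fun G e => G.set e ((G.getD e []).set i 1)) G)) G)).length = n ∧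
       ∀ a : Nat, ((C.foldl (fun G i =>
          (((List.range n).filter (fun k => P i k)).foldl
            (fun G e => G.set e ((G.getD e []).set i 1)) G)) G))[a]?
          = (G[a]?.map (fun r => C.foldl (fun r i => if P i a then r.set i 1 else r) r))) := by
  intro C
  induction C with
  | nil => intro G hG; simpa using hG
  | cons c C ih =>
    intro G hG
    have hE : ∀ e ∈ (List.range n).filter (fun k => P c k), e < G.length := by
      intro e he; rw [hG]; exact List.mem_range.mp (List.mem_of_mem_filter he)
    obtain ⟨hl1, hent1⟩ := pv_col_fold c ((List.range n).filter (fun k => P c k)) G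
      ((List.nodup_range).filter _) hE
    set G1 := ((List.range n).filter (fun k => P c k)).foldl
      (fun G e => G.set e ((G.getD e []).set c 1)) G with hG1
    obtain ⟨hl, hent⟩ := ih G1 (by rw [hl1, hG])
    refine ⟨hl, ?_⟩
    intro a
    simp only [List.foldl_cons]
    rw [hent a, hent1 a]
    by_cases ha : a < n
    · have hmem : a ∈ (List.range n).filter (fun k => P c k) ↔ P c a := by
        simp [List.mem_filter, List.mem_range, ha]
      by_cases hp : P c a
      · simp [hmem.mpr hp, hp, Option.map_map, Function.comp_def]
      · simp [hp]
    · have : G[a]? = none := List.getElem?_eq_none (by omega)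
      have hnm : a ∉ (List.range n).filter (fun k => P c k) := by
        intro h; exact ha (List.mem_range.mp (List.mem_of_mem_filter h))
      simp [this, hnm]

-- closed form of one row's sequence of conditional writes
theorem pv_row_fold (P : Nat → Nat → Bool) (a : Nat) :
    ∀ (C : List Nat) (r : List Int), C.Nodup →
      (((C.foldl (fun r i => if P i a then r.set i 1 else r) r)).length = r.length ∧
       ∀ b : Nat, ((C.foldl (fun r i => if P i a then r.set i 1 else r) r))[b]?
          = if b ∈ C ∧ P b a then (r[b]?.map (fun _ => (1 : Int))) else r[b]?) := by
  intro C
  induction C with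
  | nil => intro r _; simp
  | cons c C ih =>
    intro r hn
    set r1 := if P c a then r.set c 1 else r with hr1
    have hlen1 : r1.length = r.length := by simp [hr1]; split <;> simp
    obtain ⟨hl, hent⟩ := ih r1 hn.of_cons
    constructor
    · simpa [hlen1] using hl
    · intro b
      simp only [List.foldl_cons]
      rw [hent b]
      by_cases hbc : b = c
      · subst hbc
        have hbn : b ∉ C := (List.nodup_cons.mp hn).1
        by_cases hp : P b a
        · simp [hbn, hp, hr1]
          by_cases hlt : b < r.length
          · simp [hlt]
          · simp [hlt]
        · simp [hbn, hp, hr1]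
      · have h1 : r1[b]? = r[b]? := by
          simp [hr1]; split <;> simp [Ne.symm hbc]
        simp [h1, hbc]

theorem pv_main (F : List (List Int)) : ancestry_graph F = ancestry_graph_alt F := by
  unfold ancestry_graph ancestry_graph_alt
  simp only [PySem.List.len_eq]
  rw [pv_ofList_nodup (PySem.List.nodup_pyRange_one _ _)]
  simp only [pv_temp_eq_filter _ _ (PySem.List.nodup_pyRange_one 0 _), pv_inter_fold]
  have hfil : ∀ i : Int,
      (PySem.List.pyRange 0 ((F.headD []).length : Int) 1).filter
        (fun e => (PySem.List.pyRange 0 (F.length : Int) 1).all fun j =>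
          ((PySem.List.pyRange 0 ((F.headD []).length : Int) 1).filter
            (fun k => decide (PySem.List.pyGetD (PySem.List.pyGetD F j []) k 0 ≤
                PySem.List.pyGetD (PySem.List.pyGetD F j []) i 0))).contains e)
      = (PySem.List.pyRange 0 ((F.headD []).length : Int) 1).filter
        (fun e => (PySem.List.pyRange 0 (F.length : Int) 1).all fun j =>
          decide (PySem.List.pyGetD (PySem.List.pyGetD F j []) e 0 ≤
              PySem.List.pyGetD (PySem.List.pyGetD F j []) i 0)) := by
    intro i
    refine List.filter_congr ?_
    intro e he
    obtain ⟨h1, h2⟩ := PySem.List.mem_pyRange_one.mp he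
    simp only [List.headD_eq_head?_getD] at h2
    refine congrArg _ (funext fun j => ?_)
    simp [List.mem_filter, h1, h2]
  simp only [hfil]
  simp only [PySem.List.pyRange_zero_natCast, List.filter_map, List.foldl_map,
    List.map_map, Function.comp_def, PySem.List.pyGetD_natCast, PySem.List.pySetD_natCast]
  refine List.ext_getElem? ?_
  intro a
  obtain ⟨hlen, hent⟩ := pv_outer_fold
    (fun i k => ((List.map (fun k : Nat => (k : Int)) (List.range F.length)).all fun j =>
      decide ((PySem.List.pyGetD F j []).getD k 0 ≤ (PySem.List.pyGetD F j []).getD i 0)))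
    (F.headD []).length (List.range (F.headD []).length)
    (List.map (fun _ => List.map (fun _ => (0 : Int)) (List.range (F.headD []).length))
      (List.range (F.headD []).length)) (by simp)
  rw [hent a]
  by_cases ha : a < (F.headD []).length
  · simp only [List.getElem?_map, List.getElem?_range ha, Option.map_some]
    refine congrArg _ ?_
    obtain ⟨hrl, hrent⟩ := pv_row_fold
      (fun i k => ((List.map (fun k : Nat => (k : Int)) (List.range F.length)).all fun j =>
        decide ((PySem.List.pyGetD F j []).getD k 0 ≤ (PySem.List.pyGetD F j []).getD i 0)))
      a (List.range (F.headD []).length)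
      (List.map (fun _ => (0 : Int)) (List.range (F.headD []).length)) List.nodup_range
    refine List.ext_getElem? ?_
    intro b
    rw [hrent b]
    by_cases hb : b < (F.headD []).length
    · simp only [List.getElem?_map, List.getElem?_range hb, Option.map_some]
      have hb' : b < (F.head?.getD []).length := by
        simpa [← List.headD_eq_head?_getD] using hb
      simp only [List.mem_range]
      simp [hb']
      split_ifs with h <;> simp
    · have hbl : (F.headD []).length ≤ b := by omega
      have e1 : (List.map (fun _ => (0 : Int)) (List.range (F.headD []).length))[b]? = none := by
        apply List.getElem?_eq_none; simpa using hbl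
      have e2 : ((List.range (F.headD []).length).map (fun x_1 =>
          if ((List.map (fun k : Nat => (k : Int)) (List.range F.length)).all fun j =>
            decide ((PySem.List.pyGetD F j []).getD a 0 ≤ (PySem.List.pyGetD F j []).getD x_1 0)) = true
          then (1 : Int) else 0))[b]? = none := by
        apply List.getElem?_eq_none; simpa using hbl
      rw [e1, e2]
      simp [List.mem_range]
  · have h1 : ∀ (l : List (List Int)), l.length = (F.headD []).length → l[a]? = none := by
      intro l hl; simp; omega
    rw [h1 _ (by simp), h1 _ (by simp)]
    simp

-- ===== VERDICT (by name: the statement is the Claim_ definition above) =====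
theorem ancestry_graph_spec : Claim_equal_ancestry_graph := by
  intro F _ _
  exact pv_main F
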